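-- pv_equiv track=rewrite | github.com/wjy5446/TIL | 1_Programming/Algorithm/1.fibonachicken.py | fibo_chicken
-- ===== SOURCE A (Python) =====
-- def is_fibo(num):
--     a, b = 1, 1
--     while b < num:
--         a, b = b, a+b
--
--     if num == b:
--         return True, a
--     else:
--         return False, b
--
-- def fibo_chicken(person):
--     idx = 0 # 최근 fibo에서 얼마나 떨어져 있는 지??
--     val_recent = 0 # 최근 fibo 위치의 값
--
--     ls = [] # 피보나치킨 리스트
--
--     for i in range(1, person+1):
--         tmp = is_fibo(i)
--         if(tmp[0]==True):
--             idx = 0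
--             val_recent = tmp[1]
--             ls.append(tmp[1])
--         else:
--             ls.append(val_recent + ls[idx])
--             idx += 1
--
--     return ls
-- ===== SOURCE B (Python) =====
-- def fibo_chicken(person):
--     # Single pass: maintain the consecutive Fibonacci pair (a, b) incrementally
--     # instead of recomputing the Fibonacci sequence from scratch for every i.
--     a, b = 1, 1
--     idx = 0
--     val_recent = 0
--     ls = []
--     for i in range(1, person + 1):
--         if i == b:
--             idx = 0
--             val_recent = a
--             ls.append(a)
--             a, b = b, a + b
--         else:
--             ls.append(val_recent + ls[idx])
--             idx += 1
--     return ls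
-- ===== Notes on version B (the rewrite author's own statement) =====
-- stated objective: faster
-- what changed: B drops the is_fibo helper (which restarts a Fibonacci while-loop from (1,1) for every i) and instead carries the current consecutive Fibonacci pair across loop iterations, advancing it in O(1) when i hits it
import Mathlib
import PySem

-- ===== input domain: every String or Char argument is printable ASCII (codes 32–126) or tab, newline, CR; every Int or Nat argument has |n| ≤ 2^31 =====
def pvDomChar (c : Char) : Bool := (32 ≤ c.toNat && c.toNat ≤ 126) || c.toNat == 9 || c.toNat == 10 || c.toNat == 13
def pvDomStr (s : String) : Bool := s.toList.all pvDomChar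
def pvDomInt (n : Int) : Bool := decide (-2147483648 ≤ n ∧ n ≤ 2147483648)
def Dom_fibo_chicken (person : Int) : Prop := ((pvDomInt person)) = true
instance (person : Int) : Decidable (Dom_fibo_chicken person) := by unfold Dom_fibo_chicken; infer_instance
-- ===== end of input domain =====

-- B replaces A's per-i Fibonacci recomputation (is_fibo) by one Fibonacci pair carried
-- across the loop; objective: faster (asymptotic, measured).

-- ===== PORT A =====
-- while b < num: a, b = b, a+b  — fueled loop; fuel num.toNat is sufficient (proved below),
-- and the fuel-0 value coincides with the loop-exit value.
def isFiboGo (num a b : Int) (fuel : Nat) : Bool × Int :=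
  match fuel with
  | 0 => if num = b then (true, a) else (false, b)
  | f+1 =>
    if b < num then isFiboGo num b (a+b) f
    else if num = b then (true, a) else (false, b)

def is_fibo (num : Int) : Bool × Int := isFiboGo num 1 1 num.toNat

def fibo_chicken (person : Int) : List Int :=
  -- ls[idx]: the index is always in range when the else branch runs (1 is a Fibonacci
  -- number, so ls is nonempty and idx < ls.length there); the .getD 0 default is never used.
  ((PySem.List.pyRange 1 (person+1) 1).foldl
    (fun (st : Int × Int × List Int) (i : Int) =>
      let idx := st.1; let val_recent := st.2.1; let ls := st.2.2
      let tmp := is_fibo i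
      if tmp.1 then (0, tmp.2, ls ++ [tmp.2])
      else (idx + 1, val_recent, ls ++ [val_recent + (PySem.List.pyGet? ls idx).getD 0]))
    (0, 0, [])).2.2

-- ===== PORT B =====
def fibo_chicken_alt (person : Int) : List Int :=
  ((PySem.List.pyRange 1 (person+1) 1).foldl
    (fun (st : Int × Int × Int × Int × List Int) (i : Int) =>
      let a := st.1; let b := st.2.1; let idx := st.2.2.1
      let val_recent := st.2.2.2.1; let ls := st.2.2.2.2
      if i = b then (b, a+b, 0, a, ls ++ [a])
      else (a, b, idx + 1, val_recent, ls ++ [val_recent + (PySem.List.pyGet? ls idx).getD 0]))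
    (1, 1, 0, 0, [])).2.2.2.2

-- ===== PRECONDITION & SPEC =====
def Spec_fibo_chicken (person : Int) (out : List Int) : Prop := out = fibo_chicken_alt person
instance (person : Int) (out : List Int) : Decidable (Spec_fibo_chicken person out) := by unfold Spec_fibo_chicken; infer_instance

-- ===== CLAIM (what is proved, stated in full; the proofs are below) =====
def Claim_equal_fibo_chicken : Prop := ∀ (person : Int), Dom_fibo_chicken person → Spec_fibo_chicken person (fibo_chicken person)

-- ===== LEMMAS AND PROOFS =====

-- F k = the k-th term of A's Fibonacci iteration 1, 1, 2, 3, 5, …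
def F (k : Nat) : Int := (Nat.fib (k+1) : Int)

lemma F_pos (k : Nat) : 1 ≤ F k := by
  unfold F
  exact_mod_cast Nat.fib_pos.mpr (Nat.succ_pos k)

lemma F_add_two (k : Nat) : F (k+2) = F k + F (k+1) := by
  unfold F; push_cast [Nat.fib_add_two]; ring

lemma F_ge (k : Nat) : (k : Int) ≤ F (k+1) := by
  induction k with
  | zero => simp [F]
  | succ n ih =>
    have h1 := F_pos n
    have h2 : F (n+1+1) = F n + F (n+1) := F_add_two n
    push_cast; omega

-- running the while loop: k steps from (1,1) while the stop condition stays false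
lemma isFiboGo_run (k : Nat) : ∀ (fuel : Nat) (num : Int),
    (∀ j, j < k → F (j+1) < num) → k ≤ fuel →
    isFiboGo num 1 1 fuel = isFiboGo num (F k) (F (k+1)) (fuel - k) := by
  induction k with
  | zero => intro fuel num _ _; simp [F]
  | succ n ih =>
    intro fuel num hlt hf
    have h1 : isFiboGo num 1 1 fuel = isFiboGo num (F n) (F (n+1)) (fuel - n) :=
      ih fuel num (fun j hj => hlt j (by omega)) (by omega)
    rw [h1]
    have hlt' : F (n+1) < num := hlt n (by omega)
    obtain ⟨m, hm⟩ : ∃ m, fuel - n = m + 1 := ⟨fuel - n - 1, by omega⟩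
    rw [hm]
    simp only [isFiboGo, if_pos hlt']
    rw [← F_add_two]
    congr 1
    omega

-- loop exit: once num ≤ b the result no longer depends on the fuel
lemma isFiboGo_exit (num a b : Int) (hb : num ≤ b) (fuel : Nat) :
    isFiboGo num a b fuel = if num = b then (true, a) else (false, b) := by
  cases fuel with
  | zero => rfl
  | succ f =>
    show (if b < num then _ else _) = _
    rw [if_neg (show ¬ b < num by omega)]

-- characterization of is_fibo at the stopping index k
lemma is_fibo_char (num : Int) (k : Nat)
    (hlt : ∀ j, j < k → F (j+1) < num) (hstop : num ≤ F (k+1)) :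
    is_fibo num = if num = F (k+1) then (true, F k) else (false, F (k+1)) := by
  have hk : k ≤ num.toNat := by
    cases k with
    | zero => omega
    | succ n =>
      have h1 : F (n+1) < num := hlt n (by omega)
      have h2 : (n : Int) ≤ F (n+1) := F_ge n
      omega
  unfold is_fibo
  rw [isFiboGo_run k num.toNat num hlt hk, isFiboGo_exit _ _ _ hstop]

-- the two loop bodies preserve the correspondence between A's and B's states
lemma loop_eq (n : Nat) : ∀ (i : Int) (k : Nat) (idx vr : Int) (ls : List Int),
    1 ≤ i →
    (∀ j, j < k → F (j+1) < i) → i ≤ F (k+1) →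
    ((PySem.List.pyRange i (i + n) 1).foldl
      (fun (st : Int × Int × List Int) (i : Int) =>
        let idx := st.1; let val_recent := st.2.1; let ls := st.2.2
        let tmp := is_fibo i
        if tmp.1 then (0, tmp.2, ls ++ [tmp.2])
        else (idx + 1, val_recent, ls ++ [val_recent + (PySem.List.pyGet? ls idx).getD 0]))
      (idx, vr, ls)).2.2
    = ((PySem.List.pyRange i (i + n) 1).foldl
      (fun (st : Int × Int × Int × Int × List Int) (i : Int) =>
        let a := st.1; let b := st.2.1; let idx := st.2.2.1
        let val_recent := st.2.2.2.1; let ls := st.2.2.2.2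
        if i = b then (b, a+b, 0, a, ls ++ [a])
        else (a, b, idx + 1, val_recent, ls ++ [val_recent + (PySem.List.pyGet? ls idx).getD 0]))
      (F k, F (k+1), idx, vr, ls)).2.2.2.2 := by
  induction n with
  | zero =>
    intro i k idx vr ls _ _ _
    rw [show i + ((0:Nat):Int) = i by simp, PySem.List.pyRange_one_eq_nil (le_refl i)]
    rfl
  | succ m ih =>
    intro i k idx vr ls hi hlt hstop
    have hcons : PySem.List.pyRange i (i + (m+1 : Nat)) 1
        = i :: PySem.List.pyRange (i+1) ((i+1) + m) 1 := by
      have h3 : i + ((m+1:Nat):Int) = (i+1) + ((m:Nat):Int) := by push_cast; ring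
      have hlt2 : i < (i+1) + ((m:Nat):Int) := by omega
      rw [h3, PySem.List.pyRange_one_cons hlt2]
    rw [hcons]
    simp only [List.foldl_cons]
    by_cases hib : i = F (k+1)
    · have e1 : is_fibo i = (true, F k) := by
        rw [is_fibo_char i k hlt hstop, if_pos hib]
      simp only [e1, if_pos hib]
      have hF := F_add_two k
      have hFp := F_pos k
      have h2 := ih (i+1) (k+1) 0 (F k) (ls ++ [F k]) (by omega)
        (fun j hj => by
          rcases Nat.lt_succ_iff_lt_or_eq.mp hj with h | h
          · exact lt_trans (hlt j h) (by omega)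
          · subst h; omega)
        (by rw [show k+1+1 = k+2 from rfl, hF]; omega)
      rw [show F k + F (k+1) = F (k+1+1) from (F_add_two k).symm]
      simpa using h2
    · have e1 : is_fibo i = (false, F (k+1)) := by
        rw [is_fibo_char i k hlt hstop, if_neg hib]
      simp only [e1, if_neg hib]
      have h2 := ih (i+1) k (idx+1) vr (ls ++ [vr + (PySem.List.pyGet? ls idx).getD 0]) (by omega)
        (fun j hj => lt_trans (hlt j hj) (by omega)) (by omega)
      simpa using h2

-- ===== VERDICT (by name: the statement is the Claim_ definition above) =====
theorem fibo_chicken_spec : Claim_equal_fibo_chicken := by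
  intro person _
  unfold Spec_fibo_chicken fibo_chicken fibo_chicken_alt
  by_cases hp : person ≤ 0
  · rw [PySem.List.pyRange_one_eq_nil (by omega)]
    rfl
  · have h1 : person + 1 = 1 + (person.toNat : Int) := by omega
    rw [h1]
    have h := loop_eq person.toNat 1 0 0 0 [] (le_refl 1)
      (fun j hj => absurd hj (by omega)) (by simp [F])
    simpa [F] using h
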